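-- pv_equiv track=rewrite | github.com/pj-99/upnp-desc-to-yang | src/upnpdesc2yang/common/util.py | extract_grouping_content
-- ===== SOURCE A (Python) =====
-- def extract_grouping_content(grouping_definition):
--     new_lines = []
--     first_descriptions = False
--     # Ignore the last line  "}"
--     for line in grouping_definition.split("\n")[:-1]:
--         # Remove line.strip() start with grouping
--         if line.strip().startswith("grouping"):
--             continue
--         # Remove line.strip() start with "description"
--         if not first_descriptions and line.strip().startswith("description"):
--             first_descriptions = True
--             continue
--         new_lines.append(line)
--     return "\n".join(new_lines)
-- ===== SOURCE B (Python) =====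
-- def extract_grouping_content(grouping_definition):
--     lines = grouping_definition.split("\n")[:-1]
--     filtered = [l for l in lines if not l.strip().startswith("grouping")]
--     for i, l in enumerate(filtered):
--         if l.strip().startswith("description"):
--             del filtered[i]
--             break
--     return "\n".join(filtered)
-- ===== Notes on version B (the rewrite author's own statement) =====
-- stated objective: simpler
-- what changed: Replaced the single stateful pass with a boolean flag by a declarative filter of 'grouping' lines followed by a separate find-and-delete of the first 'description' line.
import Mathlib
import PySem

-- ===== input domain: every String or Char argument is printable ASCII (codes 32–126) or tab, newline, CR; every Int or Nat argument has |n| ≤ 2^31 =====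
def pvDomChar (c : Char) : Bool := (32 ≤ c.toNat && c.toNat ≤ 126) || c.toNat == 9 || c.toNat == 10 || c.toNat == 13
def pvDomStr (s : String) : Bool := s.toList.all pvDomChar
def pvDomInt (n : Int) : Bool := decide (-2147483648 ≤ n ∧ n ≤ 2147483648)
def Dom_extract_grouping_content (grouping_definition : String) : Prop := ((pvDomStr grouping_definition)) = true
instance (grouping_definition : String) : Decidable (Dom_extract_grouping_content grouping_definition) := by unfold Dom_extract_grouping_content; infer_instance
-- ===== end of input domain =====

-- B replaces A's single stateful flagged pass by a filter of 'grouping' lines plus a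
-- separate find-and-delete of the first 'description' line (objective: simpler).

-- shared transliteration of `line.strip().startswith("grouping")` / `…("description")`
def pvIsGroup (l : List Char) : Bool :=
  PySem.Chars.startswith (PySem.Chars.strip l) "grouping".toList
def pvIsDesc (l : List Char) : Bool :=
  PySem.Chars.startswith (PySem.Chars.strip l) "description".toList

-- ===== PORT A =====
-- one loop step: skip 'grouping' lines; skip the FIRST 'description' line (flag); keep the rest
def pvStepA (st : List (List Char) × Bool) (line : List Char) : List (List Char) × Bool :=
  if pvIsGroup line then st
  else if !st.2 && pvIsDesc line then (st.1, true)
  else (st.1 ++ [line], st.2)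

def extract_grouping_content (grouping_definition : String) : String :=
  let lines := PySem.List.slice (PySem.Chars.splitOn grouping_definition.toList "\n".toList) none (some (-1))
  let st := lines.foldl pvStepA ([], false)
  String.ofList (PySem.Chars.join "\n".toList st.1)

-- ===== PORT B =====
-- delete the first line whose strip starts with "description" (B's indexed find-and-del loop)
def pvDelFirstDesc : List (List Char) → List (List Char)
  | [] => []
  | l :: ls => if pvIsDesc l then ls else l :: pvDelFirstDesc ls

def extract_grouping_content_alt (grouping_definition : String) : String :=
  let lines := PySem.List.slice (PySem.Chars.splitOn grouping_definition.toList "\n".toList) none (some (-1))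
  let filtered := lines.filter (fun l => !pvIsGroup l)
  String.ofList (PySem.Chars.join "\n".toList (pvDelFirstDesc filtered))

-- ===== PRECONDITION & SPEC =====
def Spec_extract_grouping_content (grouping_definition : String) (out : String) : Prop := out = extract_grouping_content_alt grouping_definition
instance (grouping_definition : String) (out : String) : Decidable (Spec_extract_grouping_content grouping_definition out) := by unfold Spec_extract_grouping_content; infer_instance

-- ===== CLAIM (what is proved, stated in full; the proofs are below) =====
def Claim_equal_extract_grouping_content : Prop := ∀ (grouping_definition : String), Dom_extract_grouping_content grouping_definition → Spec_extract_grouping_content grouping_definition (extract_grouping_content grouping_definition)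

-- ===== LEMMAS AND PROOFS =====

-- once the flag is set, A keeps every non-'grouping' line
lemma foldA_true (ls acc : List (List Char)) :
    (ls.foldl pvStepA (acc, true)).1 = acc ++ ls.filter (fun l => !pvIsGroup l) := by
  induction ls generalizing acc with
  | nil => simp
  | cons l ls ih =>
      simp only [List.foldl_cons, List.filter_cons, pvStepA]
      by_cases hg : pvIsGroup l
      · simp [hg, ih]
      · simp [hg, ih]

-- before the flag is set, A's result is the filter with the first 'description' line deleted
lemma foldA_false (ls acc : List (List Char)) :
    (ls.foldl pvStepA (acc, false)).1
      = acc ++ pvDelFirstDesc (ls.filter (fun l => !pvIsGroup l)) := by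
  induction ls generalizing acc with
  | nil => simp [pvDelFirstDesc]
  | cons l ls ih =>
      simp only [List.foldl_cons, List.filter_cons, pvStepA]
      by_cases hg : pvIsGroup l
      · simp [hg, ih]
      · by_cases hd : pvIsDesc l
        · simp [hg, hd, pvDelFirstDesc, foldA_true]
        · simp [hg, hd, pvDelFirstDesc, ih]

-- ===== VERDICT (by name: the statement is the Claim_ definition above) =====
theorem extract_grouping_content_spec : Claim_equal_extract_grouping_content := by
  intro g _
  show _ = _
  simp only [extract_grouping_content, extract_grouping_content_alt]
  rw [foldA_false]
  simp
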